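-- pv_equiv track=rewrite | github.com/anthonyEShay/sudoku_solver | SudClasses.py | setupSqus
-- ===== SOURCE A (Python) =====
-- def setupSqus(size):
--     size2 = size**2
--     squs = []
--     for x in range(size2):
--         squs.append([])
--     count = 0
--     for x in range(size2):
--         for y in range(x//size * size, x//size * size + size):
--             for z in range(size):
--                 squs[y].append(count)
--                 count += 1
--     return squs
-- ===== SOURCE B (Python) =====
-- def setupSqus(size):
--     size2 = size ** 2
--     if size <= 0:
--         return [[] for _ in range(size2)]
--     return [[x * size2 + c
--              for x in range(b // size * size, b // size * size + size)
--              for c in range(b % size * size, b % size * size + size)]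
--             for b in range(size2)]
-- ===== Notes on version B (the rewrite author's own statement) =====
-- stated objective: alternative
-- what changed: Instead of A's triple-nested loop that mutates size**2 accumulator lists while threading a running counter, B builds each box's cell list directly by a closed-form comprehension over its row band and column band (cell index = x*size**2 + c).
import Mathlib
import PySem

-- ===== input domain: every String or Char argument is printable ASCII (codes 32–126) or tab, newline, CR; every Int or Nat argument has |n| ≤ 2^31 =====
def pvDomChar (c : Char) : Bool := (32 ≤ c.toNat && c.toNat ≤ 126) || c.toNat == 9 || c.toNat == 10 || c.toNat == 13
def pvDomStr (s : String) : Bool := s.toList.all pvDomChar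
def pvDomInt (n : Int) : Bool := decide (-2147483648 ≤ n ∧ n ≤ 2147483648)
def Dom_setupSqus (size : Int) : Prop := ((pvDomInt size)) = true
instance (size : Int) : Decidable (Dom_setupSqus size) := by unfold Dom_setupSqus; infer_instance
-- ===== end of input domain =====

-- B builds each box's cell list directly by a closed-form comprehension over its row and
-- column bands, instead of A's triple-nested loop that mutates size^2 accumulator lists while
-- threading a running counter (objective: alternative algorithm, same asymptotic cost).

-- ===== PORT A =====
-- squs is an Array (Python list); squs[y].append(count) is modify y (push count):
-- y is a nonnegative in-range index whenever the loop body runs (size > 0), so this is exact.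
def setupSqus (size : Int) : List (List Int) :=
  let size2 := size ^ 2
  let squs : Array (Array Int) :=
    (PySem.List.pyRange 0 size2 1).foldl (fun acc _x => acc.push #[]) #[]
  let st :=
    (PySem.List.pyRange 0 size2 1).foldl
      (fun (st : Array (Array Int) × Int) x =>
        (PySem.List.pyRange (PySem.Int.floordiv x size * size)
            (PySem.Int.floordiv x size * size + size) 1).foldl
          (fun st y =>
            (PySem.List.pyRange 0 size 1).foldl
              (fun (st : Array (Array Int) × Int) _z =>
                (st.1.modify y.toNat (fun r => r.push st.2), st.2 + 1)) st)
          st)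
      (squs, (0 : Int))
  st.1.toList.map (fun r => r.toList)

-- ===== PORT B =====
def setupSqus_alt (size : Int) : List (List Int) :=
  let size2 := size ^ 2
  if size ≤ 0 then
    (PySem.List.pyRange 0 size2 1).map (fun _ => ([] : List Int))
  else
    (PySem.List.pyRange 0 size2 1).map (fun b =>
      (PySem.List.pyRange (PySem.Int.floordiv b size * size)
          (PySem.Int.floordiv b size * size + size) 1).flatMap
        (fun x =>
          (PySem.List.pyRange (PySem.Int.mod b size * size)
              (PySem.Int.mod b size * size + size) 1).map
            (fun c => x * size2 + c)))

-- ===== PRECONDITION & SPEC =====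
def Spec_setupSqus (size : Int) (out : List (List Int)) : Prop := out = setupSqus_alt size
instance (size : Int) (out : List (List Int)) : Decidable (Spec_setupSqus size out) := by unfold Spec_setupSqus; infer_instance

-- ===== CLAIM (what is proved, stated in full; the proofs are below) =====
def Claim_equal_setupSqus : Prop := ∀ (size : Int), Dom_setupSqus size → Spec_setupSqus size (setupSqus size)

-- ===== LEMMAS AND PROOFS =====

-- list-level append-at-index (proof intermediary for A's squs[y].append)
def pyAppendAt (squs : List (List Int)) (y : Int) (v : Int) : List (List Int) :=
  squs.set y.toNat ((squs.getD y.toNat []) ++ [v])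

-- apply one (box, value) append
def pvStep (sq : List (List Int)) (p : Int × Int) : List (List Int) := pyAppendAt sq p.1 p.2

-- the array state viewed as lists
def pvToL (a : Array (Array Int)) : List (List Int) := a.toList.map (fun r => r.toList)

-- A's loops re-expressed over lists (proof intermediary)
def pvListA (size : Int) : List (List Int) :=
  let size2 := size ^ 2
  let squs : List (List Int) :=
    (PySem.List.pyRange 0 size2 1).foldl (fun acc _x => acc ++ [([] : List Int)]) []
  let st :=
    (PySem.List.pyRange 0 size2 1).foldl
      (fun (st : List (List Int) × Int) x =>
        (PySem.List.pyRange (PySem.Int.floordiv x size * size)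
            (PySem.Int.floordiv x size * size + size) 1).foldl
          (fun st y =>
            (PySem.List.pyRange 0 size 1).foldl
              (fun (st : List (List Int) × Int) _z => (pyAppendAt st.1 y st.2, st.2 + 1)) st)
          st)
      (squs, (0 : Int))
  st.1

lemma pvToL_push (a : Array (Array Int)) : pvToL (a.push #[]) = pvToL a ++ [[]] := by
  simp [pvToL]

lemma pvToL_modify (a : Array (Array Int)) (y : Int) (v : Int) :
    pvToL (a.modify y.toNat (fun r => r.push v)) = pyAppendAt (pvToL a) y v := by
  apply List.ext_getElem
  · simp [pvToL, pyAppendAt]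
  · intro i h1 h2
    simp only [pvToL, pyAppendAt, List.getElem_map, Array.getElem_toList]
    simp only [pvToL, List.length_map, Array.length_toList, Array.size_modify] at h1
    rw [Array.getElem_modify]
    rw [List.getElem_set]
    by_cases h : y.toNat = i
    · simp [h, List.getD_eq_getElem?_getD, List.getElem?_map, Array.getElem?_toList,
        Array.getElem?_eq_getElem h1]
    · simp [h]

lemma pvAeq (size : Int) : setupSqus size = pvListA size := by
  simp only [setupSqus, pvListA]
  have hz : ∀ (y : Int) (st : Array (Array Int) × Int),
      (PySem.List.pyRange 0 size 1).foldl
        (fun (st : List (List Int) × Int) _z => (pyAppendAt st.1 y st.2, st.2 + 1))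
        (pvToL st.1, st.2)
      = (pvToL ((PySem.List.pyRange 0 size 1).foldl
            (fun (st : Array (Array Int) × Int) _z =>
              (st.1.modify y.toNat (fun r => r.push st.2), st.2 + 1)) st).1,
         ((PySem.List.pyRange 0 size 1).foldl
            (fun (st : Array (Array Int) × Int) _z =>
              (st.1.modify y.toNat (fun r => r.push st.2), st.2 + 1)) st).2) := by
    intro y st
    exact List.foldl_hom (fun (st : Array (Array Int) × Int) => (pvToL st.1, st.2))
      (fun s _z => Prod.ext (pvToL_modify s.1 y s.2).symm rfl)
  have hy : ∀ (x : Int) (st : Array (Array Int) × Int),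
      (PySem.List.pyRange (PySem.Int.floordiv x size * size)
          (PySem.Int.floordiv x size * size + size) 1).foldl
        (fun st y =>
          (PySem.List.pyRange 0 size 1).foldl
            (fun (st : List (List Int) × Int) _z => (pyAppendAt st.1 y st.2, st.2 + 1)) st)
        (pvToL st.1, st.2)
      = (pvToL ((PySem.List.pyRange (PySem.Int.floordiv x size * size)
            (PySem.Int.floordiv x size * size + size) 1).foldl
          (fun st y =>
            (PySem.List.pyRange 0 size 1).foldl
              (fun (st : Array (Array Int) × Int) _z =>
                (st.1.modify y.toNat (fun r => r.push st.2), st.2 + 1)) st) st).1,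
         ((PySem.List.pyRange (PySem.Int.floordiv x size * size)
            (PySem.Int.floordiv x size * size + size) 1).foldl
          (fun st y =>
            (PySem.List.pyRange 0 size 1).foldl
              (fun (st : Array (Array Int) × Int) _z =>
                (st.1.modify y.toNat (fun r => r.push st.2), st.2 + 1)) st) st).2) := by
    intro x st
    exact List.foldl_hom (fun (st : Array (Array Int) × Int) => (pvToL st.1, st.2))
      (fun s y => hz y s)
  have hinit : pvToL ((PySem.List.pyRange 0 (size ^ 2) 1).foldl
        (fun acc _x => acc.push #[]) #[])
      = (PySem.List.pyRange 0 (size ^ 2) 1).foldl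
        (fun acc _x => acc ++ [([] : List Int)]) [] := by
    exact (List.foldl_hom pvToL (fun a _x => (pvToL_push a).symm)).symm
  rw [← hinit]
  have hmain : ∀ (l : List Int) (a : Array (Array Int)) (c : Int),
      l.foldl
        (fun (st : List (List Int) × Int) x =>
          (PySem.List.pyRange (PySem.Int.floordiv x size * size)
              (PySem.Int.floordiv x size * size + size) 1).foldl
            (fun st y =>
              (PySem.List.pyRange 0 size 1).foldl
                (fun (st : List (List Int) × Int) _z =>
                  (pyAppendAt st.1 y st.2, st.2 + 1)) st)
            st)
        (pvToL a, c)
      = (pvToL (l.foldl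
          (fun (st : Array (Array Int) × Int) x =>
            (PySem.List.pyRange (PySem.Int.floordiv x size * size)
                (PySem.Int.floordiv x size * size + size) 1).foldl
              (fun st y =>
                (PySem.List.pyRange 0 size 1).foldl
                  (fun (st : Array (Array Int) × Int) _z =>
                    (st.1.modify y.toNat (fun r => r.push st.2), st.2 + 1)) st)
              st)
          (a, c)).1,
        (l.foldl
          (fun (st : Array (Array Int) × Int) x =>
            (PySem.List.pyRange (PySem.Int.floordiv x size * size)
                (PySem.Int.floordiv x size * size + size) 1).foldl
              (fun st y =>
                (PySem.List.pyRange 0 size 1).foldl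
                  (fun (st : Array (Array Int) × Int) _z =>
                    (st.1.modify y.toNat (fun r => r.push st.2), st.2 + 1)) st)
              st)
          (a, c)).2) := by
    intro l a c
    exact List.foldl_hom (init := (a, c)) (l := l)
      (fun (st : Array (Array Int) × Int) => (pvToL st.1, st.2))
      (g₂ := fun (st : List (List Int) × Int) x =>
        (PySem.List.pyRange (PySem.Int.floordiv x size * size)
            (PySem.Int.floordiv x size * size + size) 1).foldl
          (fun st y =>
            (PySem.List.pyRange 0 size 1).foldl
              (fun (st : List (List Int) × Int) _z =>
                (pyAppendAt st.1 y st.2, st.2 + 1)) st)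
          st)
      (fun s x => hy x s)
  rw [hmain]
  rfl

-- the common initial state: n*n empty lists
def pvInit (n : Nat) : List (List Int) := (List.range (n*n)).map (fun _ => ([] : List Int))

-- the common sequence of (box, value) append operations, in program order
def pvOps (n : Nat) : List (Int × Int) :=
  (List.range ((n*n)*(n*n))).map
    (fun (idx : Nat) => (((idx/(n*n)/n*n + idx%(n*n)/n : Nat) : Int), (idx : Int)))

lemma pvRangeCast (n : Nat) :
    PySem.List.pyRange 0 (n:Int) 1 = (List.range n).map (fun (k : Nat) => (k:Int)) := by
  rw [PySem.List.pyRange_one]; simp [← List.map_eq_flatMap]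

lemma pvRangeShift (a s : Int) :
    PySem.List.pyRange a (a+s) 1 = (List.range s.toNat).map (fun (k : Nat) => a + (k:Int)) := by
  rw [PySem.List.pyRange_one]; simp [← List.map_eq_flatMap]

lemma pvRangeMul {α : Type} (a b : Nat) (f : Nat → α) :
    (List.range (a*b)).map f
      = (List.range a).flatMap (fun i => (List.range b).map (fun j => f (i*b+j))) := by
  induction a with
  | zero => simp
  | succ a ih =>
    rw [Nat.succ_mul, List.range_add, List.map_append, ih, List.range_succ,
        List.flatMap_append]
    simp [Function.comp]

lemma pvDivAux (b x r : Nat) (hb : 0 < b) (hr : r < b) :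
    (x*b + r)/b = x ∧ (x*b + r)%b = r := by
  constructor
  · rw [Nat.add_comm, Nat.mul_comm, Nat.add_mul_div_left _ _ hb, Nat.div_eq_of_lt hr]
    omega
  · rw [Nat.add_comm, Nat.mul_comm, Nat.add_mul_mod_self_left, Nat.mod_eq_of_lt hr]

lemma pvZfold (l : List Int) (y : Int) : ∀ (sq : List (List Int)) (c : Int),
    l.foldl (fun (st : List (List Int) × Int) _z => (pyAppendAt st.1 y st.2, st.2 + 1)) (sq, c)
      = (((List.range l.length).map (fun (k : Nat) => ((y, c + (k:Int)) : Int × Int))).foldl pvStep sq,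
         c + l.length) := by
  induction l with
  | nil => intro sq c; simp
  | cons h t ih =>
    intro sq c
    rw [List.foldl_cons, ih]
    refine Prod.ext ?_ (by simp; ring)
    simp only [List.length_cons, List.range_succ_eq_map, List.map_cons, List.foldl_cons,
      List.map_map]
    have h1 : pvStep sq (y, c + ((0:Nat):Int)) = pyAppendAt sq y c := by simp [pvStep]
    rw [h1]
    congr 1
    apply List.map_congr_left
    intro k _
    simp [Function.comp]; push_cast; ring

lemma pvYfold (n : Nat) (lo : Int) (m : Nat) : ∀ (sq : List (List Int)) (c : Int),
    ((List.range m).map (fun (j : Nat) => lo + (j:Int))).foldl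
      (fun (st : List (List Int) × Int) y =>
        (PySem.List.pyRange 0 (n:Int) 1).foldl
          (fun st _z => (pyAppendAt st.1 y st.2, st.2 + 1)) st)
      (sq, c)
    = (((List.range m).flatMap (fun (j : Nat) => (List.range n).map
          (fun (k : Nat) => ((lo + (j:Int), c + ((j*n+k : Nat):Int)) : Int × Int)))).foldl pvStep sq,
       c + ((m*n : Nat):Int)) := by
  induction m with
  | zero => intro sq c; simp
  | succ m ih =>
    intro sq c
    have hlen : (PySem.List.pyRange 0 (n:Int) 1).length = n := by
      rw [PySem.List.length_pyRange_one]; simp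
    rw [List.range_succ, List.map_append, List.foldl_append, ih]
    simp only [List.map_cons, List.map_nil, List.foldl_cons, List.foldl_nil]
    rw [pvZfold, hlen]
    rw [List.flatMap_append, List.foldl_append]
    refine Prod.ext ?_ (by simp; push_cast; ring)
    simp only [List.flatMap_cons, List.flatMap_nil, List.append_nil]
    congr 1
    apply List.map_congr_left
    intro k _
    have h2 : c + ((m*n : Nat):Int) + (k:Int) = c + ((m*n+k : Nat):Int) := by push_cast; ring
    rw [h2]

lemma pvXfold (n : Nat) (m : Nat) : ∀ (sq : List (List Int)) (c : Int),
    ((List.range m).map (fun (x : Nat) => (x:Int))).foldl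
      (fun (st : List (List Int) × Int) x =>
        (PySem.List.pyRange (PySem.Int.floordiv x (n:Int) * (n:Int))
            (PySem.Int.floordiv x (n:Int) * (n:Int) + (n:Int)) 1).foldl
          (fun st y =>
            (PySem.List.pyRange 0 (n:Int) 1).foldl
              (fun st _z => (pyAppendAt st.1 y st.2, st.2 + 1)) st)
          st)
      (sq, c)
    = (((List.range m).flatMap (fun (x : Nat) => (List.range n).flatMap (fun (j : Nat) => (List.range n).map
          (fun (k : Nat) => (((x/n*n + j : Nat) : Int), c + ((x*(n*n) + j*n + k : Nat):Int)))))).foldl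
         pvStep sq,
       c + ((m*(n*n) : Nat):Int)) := by
  induction m with
  | zero => intro sq c; simp
  | succ m ih =>
    intro sq c
    rw [List.range_succ, List.map_append, List.foldl_append, ih]
    simp only [List.map_cons, List.map_nil, List.foldl_cons, List.foldl_nil]
    have hfd : PySem.Int.floordiv ((m:Nat):Int) (n:Int) * (n:Int) = ((m/n*n : Nat):Int) := by
      rw [PySem.Int.floordiv_natCast]; push_cast; ring
    rw [hfd, pvRangeShift]
    have htn : ((n:Int)).toNat = n := by simp
    rw [htn, pvYfold]
    rw [List.flatMap_append, List.foldl_append]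
    refine Prod.ext ?_ (by push_cast; ring)
    simp only [List.flatMap_cons, List.flatMap_nil, List.append_nil]
    congr 1
    apply List.flatMap_congr
    intro j _
    apply List.map_congr_left
    intro k _
    exact Prod.ext (by push_cast; ring) (by push_cast; ring)

lemma pvOpsEq (n : Nat) (hn : 0 < n) :
    pvOps n
      = (List.range (n*n)).flatMap (fun (x : Nat) => (List.range n).flatMap (fun (j : Nat) => (List.range n).map
          (fun (k : Nat) => (((x/n*n + j : Nat) : Int), ((x*(n*n) + j*n + k : Nat):Int))))) := by
  rw [pvOps, pvRangeMul]
  rw [List.flatMap_def, List.flatMap_def (l := List.range (n*n))]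
  apply congrArg
  apply List.map_congr_left
  intro x _
  rw [pvRangeMul n n]
  rw [List.flatMap_def, List.flatMap_def]
  apply congrArg
  apply List.map_congr_left
  intro j hj
  apply List.map_congr_left
  intro k hk
  simp only [List.mem_range] at hj hk
  have hr : j*n + k < n*n := by
    calc j*n + k < j*n + n := by omega
    _ = (j+1)*n := by ring
    _ ≤ n*n := Nat.mul_le_mul_right n hj
  obtain ⟨hd, hm⟩ := pvDivAux (n*n) x (j*n+k) (Nat.mul_pos hn hn) hr
  obtain ⟨hd2, hm2⟩ := pvDivAux n j k hn hk
  have e1 : x*(n*n) + (j*n + k) = x*(n*n) + j*n + k := by ring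
  rw [← e1, hd, hm, hd2]

lemma pvAside (n : Nat) (hn : 0 < n) :
    setupSqus (n:Int) = (pvOps n).foldl pvStep (pvInit n) := by
  rw [pvAeq]
  simp only [pvListA]
  have h2 : ((n:Int))^2 = ((n*n : Nat) : Int) := by push_cast; ring
  rw [h2, pvRangeCast (n*n), pvXfold]
  rw [pvOpsEq n hn]
  simp only [zero_add]
  congr 1
  rw [PySem.List.foldl_append_singleton_eq_map, List.nil_append, List.map_map]
  rfl

lemma pvFoldChar (ops : List (Int × Int)) : ∀ (sq : List (List Int)),
    (∀ p ∈ ops, 0 ≤ p.1 ∧ p.1.toNat < sq.length) →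
    ops.foldl pvStep sq
      = (List.range sq.length).map
          (fun b => sq.getD b [] ++ ((ops.filter (fun p => p.1 == (b:Int))).map (·.2))) := by
  induction ops with
  | nil =>
    intro sq _
    simp
    apply List.ext_getElem
    · simp
    · intro i h1 h2
      simp only [List.getElem_map, List.getElem_range, List.getElem?_eq_getElem h1,
        Option.getD_some]
  | cons p ops ih =>
    intro sq hb
    rw [List.foldl_cons]
    have hp := hb p (List.mem_cons_self)
    have hlen : (pvStep sq p).length = sq.length := by
      simp [pvStep, pyAppendAt]
    rw [ih (pvStep sq p) (by rw [hlen]; intro q hq; exact hb q (List.mem_cons_of_mem _ hq)), hlen]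
    apply List.map_congr_left
    intro b hbm
    simp only [List.mem_range] at hbm
    by_cases hcase : p.1 = (b:Int)
    · have ht : p.1.toNat = b := by omega
      have h1 : (pvStep sq p).getD b [] = sq.getD b [] ++ [p.2] := by
        simp only [pvStep, pyAppendAt, ht]
        rw [List.getD_eq_getElem?_getD, List.getElem?_set_self (by omega)]
        simp [List.getD_eq_getElem?_getD]
      rw [h1, List.filter_cons_of_pos (by simp [hcase])]
      simp
    · have h1 : (pvStep sq p).getD b [] = sq.getD b [] := by
      -- set at a different index
        simp only [pvStep, pyAppendAt]
        rw [List.getD_eq_getElem?_getD, List.getElem?_set_ne (by omega), ← List.getD_eq_getElem?_getD]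
      rw [h1, List.filter_cons_of_neg (by simp [hcase])]

lemma pvRangeMulF {α : Type} (a b : Nat) (g : Nat → List α) :
    (List.range (a*b)).flatMap g
      = (List.range a).flatMap (fun i => (List.range b).flatMap (fun j => g (i*b+j))) := by
  induction a with
  | zero => simp
  | succ a ih =>
    rw [Nat.succ_mul, List.range_add, List.flatMap_append, ih, List.range_succ,
        List.flatMap_append]
    simp [List.flatMap_map, Function.comp]

lemma pvFlatMapSingle {α : Type} (n q0 : Nat) (hq : q0 < n) (L : List α) :
    (List.range n).flatMap (fun q => if q = q0 then L else []) = L := by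
  induction n with
  | zero => omega
  | succ n ih =>
    rw [List.range_succ, List.flatMap_append]
    by_cases h : q0 < n
    · rw [ih h]; simp [Nat.ne_of_gt h]
    · have hq0 : q0 = n := by omega
      subst hq0
      have hz : (List.range q0).flatMap (fun q => if q = q0 then L else []) = [] := by
        apply List.flatMap_eq_nil_iff.mpr
        intro q hqm
        simp at hqm
        simp [Nat.ne_of_lt hqm]
      rw [hz]; simp

lemma pvOpsBound (n : Nat) (hn : 0 < n) :
    ∀ p ∈ pvOps n, 0 ≤ p.1 ∧ p.1.toNat < n*n := by
  intro p hp
  rw [pvOps] at hp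
  simp only [List.mem_map, List.mem_range] at hp
  obtain ⟨idx, hidx, rfl⟩ := hp
  refine ⟨by positivity, ?_⟩
  simp only [Int.toNat_natCast]
  have h1 : idx/(n*n)/n < n := by
    have : idx/(n*n) < n*n := Nat.div_lt_of_lt_mul (by omega)
    exact Nat.div_lt_of_lt_mul (by omega)
  have h2 : idx%(n*n)/n < n := by
    have : idx%(n*n) < n*n := Nat.mod_lt _ (by positivity)
    exact Nat.div_lt_of_lt_mul (by omega)
  calc idx/(n*n)/n*n + idx%(n*n)/n < idx/(n*n)/n*n + n := by omega
    _ = (idx/(n*n)/n + 1)*n := by ring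
    _ ≤ n*n := Nat.mul_le_mul_right n (by omega)

lemma pvFilterOps (n : Nat) (hn : 0 < n) (b : Nat) (hb : b < n*n) :
    ((pvOps n).filter (fun p => p.1 == (b:Int))).map (·.2)
      = (List.range n).flatMap (fun (r : Nat) => (List.range n).map
          (fun (k : Nat) => (((b/n*n+r)*(n*n) + b%n*n + k : Nat) : Int))) := by
  rw [pvOpsEq n hn]
  rw [List.filter_flatMap, List.map_flatMap]
  have hstep1 : ∀ x ∈ List.range (n*n),
      (((List.range n).flatMap (fun (j : Nat) => (List.range n).map
          (fun (k : Nat) => (((x/n*n + j : Nat) : Int), ((x*(n*n) + j*n + k : Nat):Int))))).filter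
        (fun p => p.1 == (b:Int))).map (·.2)
      = if x/n = b/n then (List.range n).map (fun (k : Nat) => ((x*(n*n) + b%n*n + k : Nat):Int))
        else [] := by
    intro x _
    rw [List.filter_flatMap, List.map_flatMap]
    have hinner : ∀ j ∈ List.range n,
        (((List.range n).map (fun (k : Nat) =>
            (((x/n*n + j : Nat) : Int), ((x*(n*n) + j*n + k : Nat):Int)))).filter
          (fun p => p.1 == (b:Int))).map (·.2)
        = if j = b%n ∧ x/n = b/n
          then (List.range n).map (fun (k : Nat) => ((x*(n*n) + b%n*n + k : Nat):Int))
          else [] := by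
      intro j hj
      simp only [List.mem_range] at hj
      rw [List.filter_map]
      by_cases hc : x/n*n + j = b
      · have hd : j = b%n ∧ x/n = b/n := by
          obtain ⟨hd1, hd2⟩ := pvDivAux n (x/n) j hn hj
          rw [hc] at hd1 hd2
          exact ⟨hd2.symm, hd1.symm⟩
        rw [if_pos hd]
        have hfil : List.filter
            ((fun p => p.1 == (b:Int)) ∘ fun (k : Nat) =>
              (((x/n*n + j : Nat) : Int), ((x*(n*n) + j*n + k : Nat):Int)))
            (List.range n) = List.range n :=
          List.filter_eq_self.mpr (fun a _ => by simp [Function.comp, hc])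
        rw [hfil, List.map_map]
        apply List.map_congr_left
        intro k _
        simp [Function.comp, hd.1]
      · have hd : ¬(j = b%n ∧ x/n = b/n) := by
          rintro ⟨h1, h2⟩
          exact hc (by rw [h1, h2]; exact Nat.div_add_mod' b n)
        rw [if_neg hd]
        have hfil : List.filter
            ((fun p => p.1 == (b:Int)) ∘ fun (k : Nat) =>
              (((x/n*n + j : Nat) : Int), ((x*(n*n) + j*n + k : Nat):Int)))
            (List.range n) = [] :=
          List.filter_eq_nil_iff.mpr (fun a _ => by
            simp [Function.comp]
            intro h
            exact hc (by exact_mod_cast h))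
        rw [hfil]
        rfl
    rw [List.flatMap_congr hinner]
    by_cases hx : x/n = b/n
    · rw [if_pos hx]
      have hsimp : ∀ j ∈ List.range n,
          (if j = b%n ∧ x/n = b/n
           then (List.range n).map (fun (k : Nat) => ((x*(n*n) + b%n*n + k : Nat):Int))
           else [])
          = (if j = b%n
             then (List.range n).map (fun (k : Nat) => ((x*(n*n) + b%n*n + k : Nat):Int))
             else []) := by
        intro j _
        by_cases h : j = b%n
        · rw [if_pos ⟨h, hx⟩, if_pos h]
        · rw [if_neg (by tauto), if_neg h]
      rw [List.flatMap_congr hsimp, pvFlatMapSingle n (b%n) (Nat.mod_lt _ (by omega))]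
    · rw [if_neg hx]
      have hsimp : ∀ j ∈ List.range n,
          (if j = b%n ∧ x/n = b/n
           then (List.range n).map (fun (k : Nat) => ((x*(n*n) + b%n*n + k : Nat):Int))
           else []) = ([] : List Int) := by
        intro j _
        rw [if_neg (by tauto)]
      rw [List.flatMap_congr hsimp]
      simp
  rw [List.flatMap_congr hstep1]
  rw [pvRangeMulF (n) (n)]
  have hq : ∀ q ∈ List.range n,
      ((List.range n).flatMap (fun r =>
        if (q*n+r)/n = b/n
        then (List.range n).map (fun (k : Nat) => (((q*n+r)*(n*n) + b%n*n + k : Nat):Int))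
        else []))
      = if q = b/n
        then (List.range n).flatMap (fun r => (List.range n).map
              (fun (k : Nat) => (((b/n*n+r)*(n*n) + b%n*n + k : Nat):Int)))
        else [] := by
    intro q _
    by_cases hqq : q = b/n
    · rw [if_pos hqq]
      have hsimp : ∀ r ∈ List.range n,
          (if (q*n+r)/n = b/n
           then (List.range n).map (fun (k : Nat) => (((q*n+r)*(n*n) + b%n*n + k : Nat):Int))
           else [])
          = (List.range n).map
              (fun (k : Nat) => (((b/n*n+r)*(n*n) + b%n*n + k : Nat):Int)) := by
        intro r hr
        simp only [List.mem_range] at hr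
        rw [if_pos (by rw [(pvDivAux n q r hn hr).1]; exact hqq), hqq]
      exact List.flatMap_congr hsimp
    · rw [if_neg hqq]
      have hsimp : ∀ r ∈ List.range n,
          (if (q*n+r)/n = b/n
           then (List.range n).map (fun (k : Nat) => (((q*n+r)*(n*n) + b%n*n + k : Nat):Int))
           else []) = ([] : List Int) := by
        intro r hr
        simp only [List.mem_range] at hr
        rw [if_neg (by rw [(pvDivAux n q r hn hr).1]; exact hqq)]
      rw [List.flatMap_congr hsimp]
      simp
  rw [List.flatMap_congr hq]
  rw [pvFlatMapSingle n (b/n) (Nat.div_lt_of_lt_mul (by omega))]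

lemma pvBside (n : Nat) (hn : 0 < n) :
    setupSqus_alt (n:Int) = (pvOps n).foldl pvStep (pvInit n) := by
  have hlen : (pvInit n).length = n*n := by simp [pvInit]
  rw [pvFoldChar (pvOps n) (pvInit n) (by rw [hlen]; exact pvOpsBound n hn), hlen]
  simp only [setupSqus_alt]
  have hpos : (0:Int) < (n:Int) := by exact_mod_cast hn
  rw [if_neg (by omega)]
  have h2 : ((n:Int))^2 = ((n*n : Nat) : Int) := by push_cast; ring
  rw [h2, pvRangeCast (n*n), List.map_map]
  apply List.map_congr_left
  intro b hb
  simp only [List.mem_range] at hb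
  have hgetD : (pvInit n).getD b [] = [] := by
    simp [pvInit, List.getD_eq_getElem?_getD, List.getElem?_range hb]
  rw [hgetD, List.nil_append, pvFilterOps n hn b hb]
  simp only [Function.comp_apply]
  have hfd : PySem.Int.floordiv ((b:Nat):Int) (n:Int) * (n:Int) = ((b/n*n : Nat):Int) := by
    rw [PySem.Int.floordiv_natCast]; push_cast; ring
  have hmd : PySem.Int.mod ((b:Nat):Int) (n:Int) * (n:Int) = ((b%n*n : Nat):Int) := by
    rw [PySem.Int.mod_natCast]; push_cast; ring
  rw [hfd, hmd, pvRangeShift, pvRangeShift]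
  have htn : ((n:Int)).toNat = n := by simp
  rw [htn, List.flatMap_map]
  apply List.flatMap_congr
  intro r _
  rw [List.map_map]
  apply List.map_congr_left
  intro k _
  simp only [Function.comp_apply]
  push_cast
  ring

lemma pvNegCase (size : Int) (hs : size ≤ 0) : setupSqus size = setupSqus_alt size := by
  rw [pvAeq]
  simp only [pvListA, setupSqus_alt]
  rw [if_pos hs]
  have hinner : ∀ (st : List (List Int) × Int) (x : Int),
      (PySem.List.pyRange (PySem.Int.floordiv x size * size)
          (PySem.Int.floordiv x size * size + size) 1).foldl
        (fun st y =>
          (PySem.List.pyRange 0 size 1).foldl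
            (fun (st : List (List Int) × Int) _z => (pyAppendAt st.1 y st.2, st.2 + 1)) st)
        st = st := by
    intro st x
    rw [PySem.List.pyRange_one_eq_nil (show PySem.Int.floordiv x size * size + size ≤
      PySem.Int.floordiv x size * size by omega)]
    simp
  have houter : ∀ (l : List Int) (st : List (List Int) × Int),
      l.foldl (fun (st : List (List Int) × Int) x =>
        (PySem.List.pyRange (PySem.Int.floordiv x size * size)
            (PySem.Int.floordiv x size * size + size) 1).foldl
          (fun st y =>
            (PySem.List.pyRange 0 size 1).foldl
              (fun (st : List (List Int) × Int) _z => (pyAppendAt st.1 y st.2, st.2 + 1)) st)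
          st) st = st := by
    intro l
    induction l with
    | nil => intro st; simp
    | cons a t ih => intro st; rw [List.foldl_cons, hinner, ih]
  rw [houter]
  rw [PySem.List.foldl_append_singleton_eq_map, List.nil_append]

-- ===== VERDICT (by name: the statement is the Claim_ definition above) =====
theorem setupSqus_spec : Claim_equal_setupSqus := by
  intro size _dom
  unfold Spec_setupSqus
  by_cases hs : 0 < size
  · obtain ⟨n, rfl⟩ : ∃ n : Nat, size = (n:Int) := ⟨size.toNat, (Int.toNat_of_nonneg hs.le).symm⟩
    have hn : 0 < n := by exact_mod_cast hs
    rw [pvAside n hn, pvBside n hn]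
  · exact pvNegCase size (by omega)
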